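-- pv_equiv track=rewrite | github.com/VanHoang85/text-emotionalisation | models/data_utils/get_edit_operations.py | get_e_phrases
-- ===== SOURCE A (Python) =====
-- def get_e_phrases(tokens: list, operations: list, pos_ls: list) -> list:
--     phrases, phrase_indexes = [], []
--     idx = 0
--     start, end = None, None
--     while idx < len(tokens):
--         if operations[idx] == 'INSERT' or operations[idx] == "REPLACE":
--             if start is None:
--                 start = idx
--             end = idx
--         else:
--             if start is not None:
--                 phrase_indexes.append((start, end))
--                 start, end = None, None
--         idx += 1
--
--     if start is not None:  # add the last one
--         phrase_indexes.append((start, end))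
--
--     for start, end in phrase_indexes:
--         if pos_ls[end] == 'PRON':
--             start = start - 1
--             end = end - 1
--         elif pos_ls[start] == 'PUNCT':
--             start = start + 1
--             end = end + 1
--
--         phrases.append(' '.join(tokens[start:end + 1]))
--     return list(filter(None, phrases))
-- ===== SOURCE B (Python) =====
-- def get_e_phrases(tokens: list, operations: list, pos_ls: list) -> list:
--     n = len(tokens)
--     edit = [operations[i] == 'INSERT' or operations[i] == 'REPLACE' for i in range(n)]
--     starts = [i for i in range(n) if edit[i] and (i == 0 or not edit[i - 1])]
--     ends = [i for i in range(n) if edit[i] and (i == n - 1 or not edit[i + 1])]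
--
--     def render(span):
--         start, end = span
--         if pos_ls[end] == 'PRON':
--             start, end = start - 1, end - 1
--         elif pos_ls[start] == 'PUNCT':
--             start, end = start + 1, end + 1
--         return ' '.join(tokens[start:end + 1])
--
--     return [p for p in map(render, zip(starts, ends)) if p]
-- ===== Notes on version B (the rewrite author's own statement) =====
-- stated objective: idiomatic
-- what changed: Replaced A's while-loop start/end state machine (with its trailing 'add the last one' case) by comprehensions that read run starts (edit[i] and not edit[i-1]) and run ends (edit[i] and not edit[i+1]) directly off a precomputed edit-flag list and zip them into spans; the PRON/PUNCT shift and join step is factored into a render helper mapped over the spans.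
import Mathlib
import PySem

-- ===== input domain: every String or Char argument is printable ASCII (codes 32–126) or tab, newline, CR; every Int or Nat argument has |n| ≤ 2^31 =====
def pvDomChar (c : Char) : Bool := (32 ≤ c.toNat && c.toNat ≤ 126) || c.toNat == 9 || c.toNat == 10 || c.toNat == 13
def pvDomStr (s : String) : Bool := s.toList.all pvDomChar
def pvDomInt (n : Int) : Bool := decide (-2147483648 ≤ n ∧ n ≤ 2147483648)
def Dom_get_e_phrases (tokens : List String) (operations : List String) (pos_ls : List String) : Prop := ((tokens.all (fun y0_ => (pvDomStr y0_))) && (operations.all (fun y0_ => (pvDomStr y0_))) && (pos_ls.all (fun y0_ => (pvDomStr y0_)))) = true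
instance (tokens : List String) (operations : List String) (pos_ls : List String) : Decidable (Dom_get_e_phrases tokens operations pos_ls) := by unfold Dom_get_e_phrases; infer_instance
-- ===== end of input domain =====

-- B replaces A's while-loop start/end state machine by boundary comprehensions (run starts
-- and run ends read off the edit-flag list) zipped into spans; objective: idiomatic, same cost.

-- ===== PORT A =====
-- the while-loop: idx, start, end, phrase_indexes accumulator (indices are loop counters, hence Nat)
def getEPhrasesWhile (tokens operations : List String) (idx : Nat) (start end_ : Option Nat)
    (acc : List (Nat × Nat)) : List (Nat × Nat) :=
  if _h : idx < tokens.length then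
    if PySem.List.pyGetD operations (idx : Int) "" = "INSERT" ∨
        PySem.List.pyGetD operations (idx : Int) "" = "REPLACE" then
      getEPhrasesWhile tokens operations (idx + 1) (some (start.getD idx)) (some idx) acc
    else
      match start with
      | some s => getEPhrasesWhile tokens operations (idx + 1) none none (acc ++ [(s, end_.getD 0)])
      | none => getEPhrasesWhile tokens operations (idx + 1) none none acc
  else
    match start with
    | some s => acc ++ [(s, end_.getD 0)]
    | none => acc
termination_by tokens.length - idx
decreasing_by all_goals omega

def get_e_phrases (tokens : List String) (operations : List String) (pos_ls : List String) : List String :=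
  let phrase_indexes := getEPhrasesWhile tokens operations 0 none none []
  -- the second for-loop, inline as in A: PRON/PUNCT shifts, then ' '.join(tokens[start:end+1])
  let phrases := phrase_indexes.foldl (fun phrases se =>
    let start : Int := se.1
    let end_ : Int := se.2
    let se' : Int × Int :=
      if PySem.List.pyGetD pos_ls end_ "" = "PRON" then (start - 1, end_ - 1)
      else if PySem.List.pyGetD pos_ls start "" = "PUNCT" then (start + 1, end_ + 1)
      else (start, end_)
    phrases ++ [PySem.Str.join " " (PySem.List.slice tokens (some se'.1) (some (se'.2 + 1)))]) []
  phrases.filter (fun p => !(p == ""))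

-- ===== PORT B =====
-- edit[i] = operations[i] in {'INSERT','REPLACE'}
def editFlags (tokens operations : List String) : List Bool :=
  (List.range tokens.length).map (fun (i : Nat) =>
    PySem.List.pyGetD operations (i : Int) "" == "INSERT" ||
    PySem.List.pyGetD operations (i : Int) "" == "REPLACE")

-- B's render helper (same second-loop body as the Python B's `render`)
def bRender (tokens pos_ls : List String) (se : Nat × Nat) : String :=
  let start : Int := se.1
  let end_ : Int := se.2
  let se' : Int × Int :=
    if PySem.List.pyGetD pos_ls end_ "" = "PRON" then (start - 1, end_ - 1)
    else if PySem.List.pyGetD pos_ls start "" = "PUNCT" then (start + 1, end_ + 1)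
    else (start, end_)
  PySem.Str.join " " (PySem.List.slice tokens (some se'.1) (some (se'.2 + 1)))

def get_e_phrases_alt (tokens : List String) (operations : List String) (pos_ls : List String) : List String :=
  let n := tokens.length
  let edit := editFlags tokens operations
  let starts := (List.range n).filter (fun i => edit.getD i false && (decide (i = 0) || !edit.getD (i - 1) false))
  let ends := (List.range n).filter (fun i => edit.getD i false && (decide (i = n - 1) || !edit.getD (i + 1) false))
  (((starts.zip ends).map (bRender tokens pos_ls)).filter (fun p => !(p == "")))

-- ===== PRECONDITION & SPEC =====
-- Pre_ excludes exactly the inputs where Python A raises IndexError: operations shorter than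
-- tokens, or some edited index (the end of an edit run) out of range of pos_ls.
def Pre_get_e_phrases (tokens : List String) (operations : List String) (pos_ls : List String) : Prop :=
  tokens.length ≤ operations.length ∧
  ∀ i < tokens.length,
    (operations.getD i "" = "INSERT" ∨ operations.getD i "" = "REPLACE") → i < pos_ls.length
instance (tokens : List String) (operations : List String) (pos_ls : List String) : Decidable (Pre_get_e_phrases tokens operations pos_ls) := by unfold Pre_get_e_phrases; infer_instance

def pvWitness_get_e_phrases : List String × List String × List String :=
  (["we", "are", "sad", "."], ["EQUAL", "REPLACE", "REPLACE", "EQUAL"], ["PRON", "AUX", "ADJ", "PUNCT"])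

def Spec_get_e_phrases (tokens : List String) (operations : List String) (pos_ls : List String) (out : List String) : Prop := out = get_e_phrases_alt tokens operations pos_ls
instance (tokens : List String) (operations : List String) (pos_ls : List String) (out : List String) : Decidable (Spec_get_e_phrases tokens operations pos_ls out) := by unfold Spec_get_e_phrases; infer_instance

-- ===== CLAIM (what is proved, stated in full; the proofs are below) =====
def Claim_equal_get_e_phrases : Prop := ∀ (tokens : List String) (operations : List String) (pos_ls : List String), Dom_get_e_phrases tokens operations pos_ls → Pre_get_e_phrases tokens operations pos_ls → Spec_get_e_phrases tokens operations pos_ls (get_e_phrases tokens operations pos_ls)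

-- ===== LEMMAS AND PROOFS =====

-- the edit flag at index i, as a Bool
def fE (operations : List String) (i : Nat) : Bool :=
  PySem.List.pyGetD operations (i : Int) "" == "INSERT" ||
  PySem.List.pyGetD operations (i : Int) "" == "REPLACE"

-- pure state machine over the flag list, mirroring A's while loop
def machine (bs : List Bool) (i : Nat) (start end_ : Option Nat) (acc : List (Nat × Nat)) :
    List (Nat × Nat) :=
  match bs with
  | [] =>
    match start with
    | some s => acc ++ [(s, end_.getD 0)]
    | none => acc
  | b :: bs' =>
    if b then machine bs' (i + 1) (some (start.getD i)) (some i) acc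
    else
      match start with
      | some s => machine bs' (i + 1) none none (acc ++ [(s, end_.getD 0)])
      | none => machine bs' (i + 1) none none acc

-- run starts (prev = the flag at index i-1) and run ends (lookahead) of a flag list
def startsF : List Bool → Nat → Bool → List Nat
  | [], _, _ => []
  | b :: bs, i, prev => (if b && !prev then [i] else []) ++ startsF bs (i + 1) b

def endsF : List Bool → Nat → List Nat
  | [], _ => []
  | b :: bs, i => (if b && !(bs.headD false) then [i] else []) ++ endsF bs (i + 1)

theorem while_eq_machine (tokens operations : List String) :
    ∀ fuel idx start end_ acc, tokens.length - idx = fuel →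
      getEPhrasesWhile tokens operations idx start end_ acc =
        machine ((List.range' idx (tokens.length - idx)).map (fE operations)) idx start end_ acc := by
  intro fuel
  induction fuel with
  | zero =>
    intro idx start end_ acc h
    rw [getEPhrasesWhile.eq_def, h]
    have hlt : ¬ idx < tokens.length := by omega
    cases start <;> simp [hlt, machine]
  | succ fuel ih =>
    intro idx start end_ acc h
    have hlt : idx < tokens.length := by omega
    have hr : List.range' idx (tokens.length - idx) = idx :: List.range' (idx + 1) (tokens.length - (idx + 1)) := by
      rw [h]
      have h1 : tokens.length - (idx + 1) = fuel := by omega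
      rw [h1, List.range'_succ]
    rw [getEPhrasesWhile.eq_def, hr]
    by_cases hop : PySem.List.pyGetD operations (idx : Int) "" = "INSERT" ∨
        PySem.List.pyGetD operations (idx : Int) "" = "REPLACE"
    · have hf : fE operations idx = true := by
        simp only [fE, Bool.or_eq_true, beq_iff_eq]; tauto
      simp only [List.map_cons, machine, hf, if_true, hlt, dif_pos, hop]
      exact ih (idx + 1) _ _ acc (by omega)
    · have hf : fE operations idx = false := by
        simp only [fE, Bool.or_eq_true, beq_iff_eq, Bool.eq_false_iff, ne_eq]; tauto
      simp only [List.map_cons, machine, hf, hlt, dif_pos, hop, if_neg, Bool.false_eq_true,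
        not_false_eq_true]
      cases start with
      | some s => exact ih (idx + 1) _ _ _ (by omega)
      | none => exact ih (idx + 1) _ _ _ (by omega)

theorem machine_eq_zip (bs : List Bool) :
    (∀ i e acc, machine bs i none e acc = acc ++ (startsF bs i false).zip (endsF bs i)) ∧
    (∀ i s acc, machine bs i (some s) (some (i - 1)) acc =
      acc ++ ((s :: startsF bs i true).zip
        ((if bs.headD false then [] else [i - 1]) ++ endsF bs i))) := by
  induction bs with
  | nil => simp [machine, startsF, endsF]
  | cons b bs ih =>
    constructor
    · intro i e acc
      by_cases hb : b
      · subst hb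
        have h2 := ih.2 (i + 1) i acc
        simp only [Nat.add_sub_cancel] at h2
        simp [machine, startsF, endsF, h2]
        cases bs.head?.getD false <;> simp
      · simp only [Bool.not_eq_true] at hb; subst hb
        simp [machine, startsF, endsF, ih.1]
    · intro i s acc
      by_cases hb : b
      · subst hb
        have h2 := ih.2 (i + 1) s acc
        simp only [Nat.add_sub_cancel] at h2
        simp [machine, startsF, endsF, h2]
        cases bs.head?.getD false <;> simp
      · simp only [Bool.not_eq_true] at hb; subst hb
        simp [machine, startsF, endsF, ih.1]

theorem getD_editFlags (tokens operations : List String) (i : Nat) (h : i < tokens.length) :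
    (editFlags tokens operations).getD i false = fE operations i := by
  unfold editFlags fE
  exact PySem.List.getD_map_range _ _ _ _ h

theorem starts_eq (tokens operations : List String) :
    ∀ k i, i + k = tokens.length →
      ((List.range' i k).filter (fun j => (editFlags tokens operations).getD j false &&
          (decide (j = 0) || !(editFlags tokens operations).getD (j - 1) false))) =
        startsF ((List.range' i k).map (fE operations)) i
          (!(decide (i = 0)) && (editFlags tokens operations).getD (i - 1) false) := by
  intro k
  induction k with
  | zero => intro i h; simp [startsF]
  | succ k ih =>
    intro i h
    rw [List.range'_succ]
    simp only [List.filter_cons, List.map_cons, startsF]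
    rw [ih (i + 1) (by omega)]
    have hI : (editFlags tokens operations).getD i false = fE operations i :=
      getD_editFlags _ _ _ (by omega)
    simp only [hI, Nat.add_sub_cancel, decide_eq_false (by omega : ¬ (i + 1 = 0)), Bool.not_false]
    cases hfe : fE operations i <;> cases hd : decide (i = 0) <;>
      cases hg : (editFlags tokens operations).getD (i - 1) false <;> simp_all

theorem ends_eq (tokens operations : List String) :
    ∀ k i, i + k = tokens.length →
      ((List.range' i k).filter (fun j => (editFlags tokens operations).getD j false &&
          (decide (j = tokens.length - 1) || !(editFlags tokens operations).getD (j + 1) false))) =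
        endsF ((List.range' i k).map (fE operations)) i := by
  intro k
  induction k with
  | zero => intro i h; simp [endsF]
  | succ k ih =>
    intro i h
    rw [List.range'_succ]
    simp only [List.filter_cons, List.map_cons, endsF]
    rw [ih (i + 1) (by omega)]
    have hI : (editFlags tokens operations).getD i false = fE operations i :=
      getD_editFlags _ _ _ (by omega)
    have head : ((List.range' (i + 1) k).map (fE operations)).headD false =
        (decide (i + 1 < tokens.length) && fE operations (i + 1)) := by
      cases k with
      | zero => simp [decide_eq_false (by omega : ¬ (i + 1 < tokens.length))]
      | succ k' => rw [List.range'_succ]; simp [decide_eq_true (by omega : i + 1 < tokens.length)]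
    have hcond : (decide (i = tokens.length - 1) ||
        !(editFlags tokens operations).getD (i + 1) false) =
        !(decide (i + 1 < tokens.length) && fE operations (i + 1)) := by
      by_cases hl : i + 1 < tokens.length
      · rw [getD_editFlags _ _ _ hl]
        simp [decide_eq_false (by omega : ¬ (i = tokens.length - 1)), decide_eq_true hl]
      · have hi : i = tokens.length - 1 := by omega
        have hge : (editFlags tokens operations).getD (i + 1) false = false := by
          apply List.getD_eq_default
          simp [editFlags]; omega
        simp [decide_eq_true hi, decide_eq_false hl]
    rw [hI, head, hcond]
    cases hfe : fE operations i <;>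
      cases hn : (decide (i + 1 < tokens.length) && fE operations (i + 1)) <;> simp_all

-- A's collected phrase_indexes are exactly B's zipped run starts and ends
theorem spans_eq (tokens operations : List String) :
    getEPhrasesWhile tokens operations 0 none none [] =
      ((List.range tokens.length).filter (fun i => (editFlags tokens operations).getD i false &&
          (decide (i = 0) || !(editFlags tokens operations).getD (i - 1) false))).zip
        ((List.range tokens.length).filter (fun i => (editFlags tokens operations).getD i false &&
          (decide (i = tokens.length - 1) || !(editFlags tokens operations).getD (i + 1) false))) := by
  rw [while_eq_machine tokens operations (tokens.length - 0) 0 none none [] rfl]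
  rw [(machine_eq_zip _).1]
  rw [List.range_eq_range']
  rw [starts_eq tokens operations tokens.length 0 (by omega)]
  rw [ends_eq tokens operations tokens.length 0 (by omega)]
  simp

-- ===== VERDICT (by name: the statement is the Claim_ definition above) =====
theorem get_e_phrases_spec : Claim_equal_get_e_phrases := by
  intro tokens operations pos_ls _hdom _hpre
  unfold Spec_get_e_phrases get_e_phrases get_e_phrases_alt
  dsimp only
  rw [PySem.List.foldl_append_singleton_eq_map, spans_eq tokens operations]
  rfl
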